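-- pv_equiv track=rewrite | github.com/Aisha01/PDF-Table-Reader-using-Python | main_4.py | split_multiline_rows
-- ===== SOURCE A (Python) =====
-- def process_first_column(first_col):
--     lines = first_col.split('\n')
--     combined_lines = [' '.join(lines[i:i+2]) for i in range(0, len(lines), 2)]
--     return combined_lines
--
-- def split_multiline_rows(rows, codice_index):
--     new_rows = []
--     for row in rows:
--         # Exclude the "CODICE" column
--         row = row[:codice_index] + row[codice_index+1:]
--         first_col_processed = process_first_column(row[0])
--         remaining_cols = [col.split('\n') for col in row[1:]]
--         max_splits = max(len(first_col_processed), *[len(col) for col in remaining_cols])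
--         while len(first_col_processed) < max_splits:
--             first_col_processed.append('')
--         for col in remaining_cols:
--             while len(col) < max_splits:
--                 col.append('')
--         for i in range(max_splits):
--             new_row = [first_col_processed[i]] + [col[i] for col in remaining_cols]
--             new_rows.append(new_row)
--     return new_rows
-- ===== SOURCE B (Python) =====
-- def process_first_column(first_col):
--     lines = first_col.split('\n')
--     combined_lines = [' '.join(lines[i:i+2]) for i in range(0, len(lines), 2)]
--     return combined_lines
--
-- def split_multiline_rows(rows, codice_index):
--     new_rows = []
--     for row in rows:
--         # Exclude the "CODICE" column
--         row = row[:codice_index] + row[codice_index+1:]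
--         cols = [process_first_column(row[0])]
--         cols += [col.split('\n') for col in row[1:]]
--         # Ragged transpose by consuming heads: no max computation, no padding.
--         while any(cols):
--             new_rows.append([col.pop(0) if col else '' for col in cols])
--     return new_rows
-- ===== Notes on version B (the rewrite author's own statement) =====
-- stated objective: simpler
-- what changed: Replaces the max-of-lengths computation, the while-loop padding of every column with '' and the index-based transpose over range(max_splits) by a single ragged transpose that repeatedly pops the head of each column (empty columns yield '') until all columns are exhausted.
import Mathlib
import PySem

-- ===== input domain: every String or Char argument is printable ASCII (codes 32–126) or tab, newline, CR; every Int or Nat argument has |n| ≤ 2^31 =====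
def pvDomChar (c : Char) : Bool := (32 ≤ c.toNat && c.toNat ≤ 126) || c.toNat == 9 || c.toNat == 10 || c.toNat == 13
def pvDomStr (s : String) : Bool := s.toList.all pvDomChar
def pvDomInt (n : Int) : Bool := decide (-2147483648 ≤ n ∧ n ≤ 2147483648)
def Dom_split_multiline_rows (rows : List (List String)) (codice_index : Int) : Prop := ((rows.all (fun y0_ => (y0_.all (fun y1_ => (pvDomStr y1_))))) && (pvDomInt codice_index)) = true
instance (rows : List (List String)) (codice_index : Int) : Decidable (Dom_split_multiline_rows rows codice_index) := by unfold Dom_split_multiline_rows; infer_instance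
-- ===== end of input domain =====

-- B replaces A's max-of-lengths computation, ''-padding while-loops and index transpose by a
-- ragged transpose that pops the head of each column until all are exhausted (objective: simpler).

-- ===== PORT A =====
-- ' '.join(lines[i:i+2]) for i in range(0, len(lines), 2); split on '\n' never raises (sep ≠ "")
def processFirstColumn (firstCol : String) : List String :=
  let lines := (PySem.Str.split? firstCol "\n").getD []
  (PySem.List.pyRange 0 (lines.length : Int) 2).map
    (fun i => PySem.Str.join " " (PySem.List.slice lines (some i) (some (i + 2))))

-- while len(col) < m: col.append('')
def padA (col : List String) (m : Int) : List String :=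
  if (col.length : Int) < m then padA (col ++ [""]) m else col
  termination_by (m - col.length).toNat
  decreasing_by simp_all; omega

def split_multiline_rows (rows : List (List String)) (codice_index : Int) : List (List String) :=
  rows.foldl (fun new_rows row =>
    let row' := PySem.List.slice row none (some codice_index) ++
                PySem.List.slice row (some (codice_index + 1)) none
    let first := processFirstColumn (PySem.List.pyGetD row' 0 "")   -- row[0]; Pre_ keeps it in range
    let remaining := (PySem.List.slice row' (some 1) none).map
                       (fun col => (PySem.Str.split? col "\n").getD [])
    -- max(len(first), *[len(col) for col in remaining]); Python raises iff remaining = [] (Pre_)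
    let maxSplits := (remaining.map (fun col => (col.length : Int))).foldl max (first.length : Int)
    let firstP := padA first maxSplits
    let remainingP := remaining.map (fun col => padA col maxSplits)
    (PySem.List.pyRange 0 maxSplits 1).foldl
      (fun acc i => acc ++ [PySem.List.pyGetD firstP i "" ::
                            remainingP.map (fun col => PySem.List.pyGetD col i "")]) new_rows)
    []

-- ===== PORT B =====
-- termination helper for popLoop: popping a head from every non-empty column shrinks the cell count
lemma pvSumTailLe (cols : List (List String)) :
    (List.map List.length (List.map List.tail cols)).sum ≤ (List.map List.length cols).sum := by
  induction cols with
  | nil => simp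
  | cons c cs ih =>
    simp only [List.map_cons, List.sum_cons]
    have : c.tail.length = c.length - 1 := List.length_tail
    omega

lemma pvSumTailLt (cols : List (List String)) (h : cols.any (fun c => !c.isEmpty) = true) :
    (List.map List.length (List.map List.tail cols)).sum < (List.map List.length cols).sum := by
  induction cols with
  | nil => simp at h
  | cons c cs ih =>
    simp only [List.any_cons, Bool.or_eq_true] at h
    have htail : c.tail.length = c.length - 1 := List.length_tail
    simp only [List.map_cons, List.sum_cons]
    rcases h with h | h
    · have hne : c ≠ [] := by simpa using h
      have : 0 < c.length := List.length_pos_of_ne_nil hne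
      have := pvSumTailLe cs
      omega
    · have := ih h
      omega

-- while any(cols): new_rows.append([col.pop(0) if col else '' for col in cols])
def popLoop (new_rows : List (List String)) (cols : List (List String)) : List (List String) :=
  if cols.any (fun c => !c.isEmpty) = true then
    popLoop (new_rows ++ [cols.map (fun c => c.headD "")]) (cols.map List.tail)
  else new_rows
  termination_by (cols.map List.length).sum
  decreasing_by simpa using pvSumTailLt cols (by assumption)

def split_multiline_rows_alt (rows : List (List String)) (codice_index : Int) : List (List String) :=
  rows.foldl (fun new_rows row =>
    let row' := PySem.List.slice row none (some codice_index) ++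
                PySem.List.slice row (some (codice_index + 1)) none
    let cols := processFirstColumn (PySem.List.pyGetD row' 0 "") ::
                (PySem.List.slice row' (some 1) none).map
                  (fun col => (PySem.Str.split? col "\n").getD [])
    popLoop new_rows cols)
    []

-- ===== PRECONDITION & SPEC =====
-- Pre_ excludes exactly the inputs where the Python A raises: a row that, once the codice column
-- is cut out, has no cell left (IndexError on row[0]) or a single cell (TypeError from max(int)).
def Pre_split_multiline_rows (rows : List (List String)) (codice_index : Int) : Prop :=
  ∀ row ∈ rows,
    2 ≤ (PySem.List.slice row none (some codice_index) ++
         PySem.List.slice row (some (codice_index + 1)) none).length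
instance (rows : List (List String)) (codice_index : Int) : Decidable (Pre_split_multiline_rows rows codice_index) := by unfold Pre_split_multiline_rows; infer_instance

def pvWitness_split_multiline_rows : List (List String) × Int := ([["a\nb\nc", "x\ny", "z"]], 0)

def Spec_split_multiline_rows (rows : List (List String)) (codice_index : Int) (out : List (List String)) : Prop := out = split_multiline_rows_alt rows codice_index
instance (rows : List (List String)) (codice_index : Int) (out : List (List String)) : Decidable (Spec_split_multiline_rows rows codice_index out) := by unfold Spec_split_multiline_rows; infer_instance

-- ===== CLAIM (what is proved, stated in full; the proofs are below) =====
def Claim_equal_split_multiline_rows : Prop := ∀ (rows : List (List String)) (codice_index : Int), Dom_split_multiline_rows rows codice_index → Pre_split_multiline_rows rows codice_index → Spec_split_multiline_rows rows codice_index (split_multiline_rows rows codice_index)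


-- ===== LEMMAS AND PROOFS =====

-- padA's while loop pads the column with '' up to length m
lemma padA_eq (col : List String) (m : Int) :
    padA col m = col ++ List.replicate (m - col.length).toNat "" := by
  fun_induction padA col m with
  | case1 col h ih =>
    rw [ih]
    have h1 : (m - ((col ++ [""]).length : Int)).toNat + 1 = (m - (col.length : Int)).toNat := by
      simp only [List.length_append, List.length_cons, List.length_nil]
      omega
    rw [← h1, List.append_assoc, List.replicate_succ]
    rfl
  | case2 col h =>
    have : (m - (col.length : Int)).toNat = 0 := by omega
    simp [this]

-- padding with the default is invisible to getD
lemma getD_append_replicate (l : List String) (k n : Nat) (d : String) :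
    (l ++ List.replicate k d).getD n d = l.getD n d := by
  induction l generalizing n with
  | nil =>
    simp only [List.nil_append, List.getD, List.getElem?_replicate, List.getElem?_nil]
    split <;> simp
  | cons x xs ih =>
    cases n with
    | zero => rfl
    | succ n => simpa using ih n

lemma getD_padA (col : List String) (m : Int) (n : Nat) :
    (padA col m).getD n "" = col.getD n "" := by
  rw [padA_eq]; exact getD_append_replicate col _ n ""

-- running maximum of the column lengths
def natMaxLen (cols : List (List String)) : Nat :=
  cols.foldl (fun a c => max a c.length) 0

lemma foldl_max_len_off (cols : List (List String)) (a : Nat) :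
    cols.foldl (fun acc c => max acc c.length) a =
      max a (cols.foldl (fun acc c => max acc c.length) 0) := by
  induction cols generalizing a with
  | nil => simp
  | cons c cs ih =>
    simp only [List.foldl_cons]
    rw [ih, ih (max 0 c.length)]
    omega

lemma natMaxLen_cons (c : List String) (cs : List (List String)) :
    natMaxLen (c :: cs) = max c.length (natMaxLen cs) := by
  simp only [natMaxLen, List.foldl_cons]
  rw [foldl_max_len_off]
  omega

lemma natMaxLen_eq_zero_iff (cols : List (List String)) :
    natMaxLen cols = 0 ↔ cols.any (fun c => !c.isEmpty) = false := by
  induction cols with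
  | nil => simp [natMaxLen]
  | cons c cs ih =>
    have hc : ((!c.isEmpty) = false) ↔ c.length = 0 := by cases c <;> simp
    rw [List.any_cons, Bool.or_eq_false_iff, ← ih, natMaxLen_cons, hc]
    omega

lemma natMaxLen_tail (cols : List (List String)) :
    natMaxLen (cols.map List.tail) = natMaxLen cols - 1 := by
  induction cols with
  | nil => simp [natMaxLen]
  | cons c cs ih =>
    rw [List.map_cons, natMaxLen_cons, natMaxLen_cons, ih]
    have : c.tail.length = c.length - 1 := List.length_tail
    omega

lemma getD_zero_headD (c : List String) : c.getD 0 "" = c.headD "" := by cases c <;> rfl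

lemma getD_tail (c : List String) (i : Nat) (d : String) :
    c.tail.getD i d = c.getD (i + 1) d := by cases c <;> rfl

-- B's pop-the-heads loop produces exactly the rows [cols₀[i], cols₁[i], …] for i < max length
lemma popLoop_eq (n : Nat) : ∀ (cols : List (List String)) (acc : List (List String)),
    natMaxLen cols = n →
    popLoop acc cols = acc ++ (List.range n).map (fun i => cols.map (fun c => c.getD i "")) := by
  induction n with
  | zero =>
    intro cols acc h
    rw [popLoop.eq_def, if_neg (by simp [(natMaxLen_eq_zero_iff cols).mp h])]
    simp
  | succ n ih =>
    intro cols acc h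
    have hany : cols.any (fun c => !c.isEmpty) = true := by
      by_contra hc
      have := (natMaxLen_eq_zero_iff cols).mpr (by simpa using hc)
      omega
    rw [popLoop.eq_def, if_pos hany]
    rw [ih (cols.map List.tail) _ (by rw [natMaxLen_tail, h]; omega)]
    have h0 : cols.map (fun c => c.headD "") = cols.map (fun c => c.getD 0 "") :=
      List.map_congr_left fun c _ => (getD_zero_headD c).symm
    have h1 : (List.range n).map (fun i => (cols.map List.tail).map (fun c => c.getD i "")) =
        (List.range n).map (fun i => cols.map (fun c => c.getD (i + 1) "")) :=
      List.map_congr_left fun i _ => by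
        rw [List.map_map]
        exact List.map_congr_left fun c _ => getD_tail c i ""
    rw [h0, h1, List.range_succ_eq_map, List.map_cons, List.map_map, List.append_assoc,
      List.singleton_append]
    rfl

-- the Int-valued running max A computes is the cast of the Nat-valued one
lemma foldl_max_cast (l : List (List String)) (k : Nat) :
    (l.map (fun col => (col.length : Int))).foldl max (k : Int) =
      ((l.foldl (fun a c => max a c.length) k : Nat) : Int) := by
  induction l generalizing k with
  | nil => rfl
  | cons c cs ih =>
    simp only [List.map_cons, List.foldl_cons]
    rw [← Nat.cast_max, ih]

-- per-row equality of A's pad-and-index transpose with B's pop-the-heads transpose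
lemma row_step_eq (new_rows : List (List String)) (first : List String)
    (remaining : List (List String)) :
    (PySem.List.pyRange 0 ((remaining.map (fun col => (col.length : Int))).foldl max
        (first.length : Int)) 1).foldl
      (fun acc i => acc ++ [PySem.List.pyGetD
          (padA first ((remaining.map (fun col => (col.length : Int))).foldl max
            (first.length : Int))) i "" ::
        (remaining.map (fun col => padA col ((remaining.map (fun col => (col.length : Int))).foldl
          max (first.length : Int)))).map (fun col => PySem.List.pyGetD col i "")]) new_rows
    = popLoop new_rows (first :: remaining) := by
  set m := (remaining.map (fun col => (col.length : Int))).foldl max (first.length : Int) with hm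
  have hcast : m = ((remaining.foldl (fun a c => max a c.length) first.length : Nat) : Int) :=
    foldl_max_cast remaining first.length
  have hmax : natMaxLen (first :: remaining) = m.toNat := by
    rw [natMaxLen_cons, hcast, Int.toNat_natCast, natMaxLen, ← foldl_max_len_off]
  rw [popLoop_eq m.toNat (first :: remaining) new_rows hmax]
  rw [PySem.List.foldl_append_singleton_eq_map]
  congr 1
  rw [PySem.List.pyRange_one]
  simp only [Int.sub_zero, List.map_map]
  apply List.map_congr_left
  intro k _
  simp only [Function.comp_apply, Int.zero_add, PySem.List.pyGetD_natCast, List.map_cons]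
  rw [getD_padA]
  exact congrArg (first.getD k "" :: ·)
    (List.map_congr_left fun c _ => by simp only [Function.comp_apply]; exact getD_padA c m k)

-- ===== VERDICT (by name: the statement is the Claim_ definition above) =====
theorem split_multiline_rows_spec : Claim_equal_split_multiline_rows := by
  intro rows codice_index _ _
  unfold Spec_split_multiline_rows split_multiline_rows split_multiline_rows_alt
  congr 1
  funext new_rows row
  exact row_step_eq new_rows _ _
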